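-- pv_equiv track=rewrite | github.com/mfitzp/diffcast | diffcast/diffrunner.py | process_deltas
-- ===== SOURCE A (Python) =====
-- DIFF_INSERTION = '+'
--
-- DIFF_DELETION = '-'
--
-- DIFF_COMMENT = '?'
--
-- DIFF_EDIT = 'e'
--
-- def parse_delta(dc):
--     return dc[0], dc[2:]
--
-- def process_deltas(delta):
--     # Strip comments.
--     delta = [d for d in delta if d[0] != DIFF_COMMENT]
--
--     # Process DIFF_DELETION, DIFF_INSERTION into DIFF_EDIT
--     tdelta = []
--     tdl = 0
--     while tdl < len(delta):
--         cc1, _ = parse_delta(delta[tdl])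
--         if tdl < len(delta) - 1:
--             cc2, _ = parse_delta(delta[tdl + 1])
--         else:
--             cc2 = None
--         if (cc1, cc2) == (DIFF_DELETION, DIFF_INSERTION):
--             deltast = delta[tdl + 1]
--             deltast = DIFF_EDIT + deltast[1:]
--             tdelta.append(deltast)
--             tdl += 2
--             continue
--         tdelta.append(delta[tdl])
--         tdl += 1
--
--     return tdelta
-- ===== SOURCE B (Python) =====
-- DIFF_INSERTION = '+'
--
-- DIFF_DELETION = '-'
--
-- DIFF_COMMENT = '?'
--
-- DIFF_EDIT = 'e'
--
--
-- def process_deltas(delta):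
--     # Single forward pass; the output list doubles as a stack whose top is the
--     # previous surviving delta.
--     out = []
--     for d in delta:
--         c = d[0]
--         if c == DIFF_COMMENT:
--             continue
--         if c == DIFF_INSERTION and out and out[-1][0] == DIFF_DELETION:
--             out[-1] = DIFF_EDIT + d[1:]
--         else:
--             out.append(d)
--     return out
-- ===== Notes on version B (the rewrite author's own statement) =====
-- stated objective: idiomatic
-- what changed: Replaced the index-based while loop with a two-step lookahead (and its separate comment-stripping prefilter pass) by a single forward pass that skips comments inline and merges a '+' delta with a '-' delta by looking back at the top of the output list used as a stack.
import Mathlib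
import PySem

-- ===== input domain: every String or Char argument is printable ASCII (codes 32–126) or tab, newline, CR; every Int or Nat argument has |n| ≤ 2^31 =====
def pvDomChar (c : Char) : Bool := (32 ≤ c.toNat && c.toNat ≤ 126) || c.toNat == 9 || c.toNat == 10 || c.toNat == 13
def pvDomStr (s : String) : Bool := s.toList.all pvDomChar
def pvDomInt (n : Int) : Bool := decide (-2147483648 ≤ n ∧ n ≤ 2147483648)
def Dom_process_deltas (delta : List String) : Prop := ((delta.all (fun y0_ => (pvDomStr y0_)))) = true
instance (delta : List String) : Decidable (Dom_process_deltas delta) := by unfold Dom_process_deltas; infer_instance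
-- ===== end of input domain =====

-- B replaces A's prefilter + index-walk with lookahead by one stack-based forward pass (idiomatic; same cost).

-- ===== PORT A =====
-- d[0], the char on which both programs branch (d[0] raises IndexError on "", excluded by Pre_)
def pvHead (d : String) : Option Char := PySem.Str.pyGet? d 0

def parse_delta (dc : String) : Option Char × String :=
  (pvHead dc, PySem.Str.slice dc (some 2) none)

-- the while loop over the comment-stripped list, with its two-step lookahead
def pvMergeLoop : List String → List String
  | [] => []
  | [d1] => [d1]
  | d1 :: d2 :: rest =>
    if (parse_delta d1).1 = some '-' ∧ (parse_delta d2).1 = some '+' then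
      ("e" ++ PySem.Str.slice d2 (some 1) none) :: pvMergeLoop rest
    else
      d1 :: pvMergeLoop (d2 :: rest)

def process_deltas (delta : List String) : List String :=
  pvMergeLoop (delta.filter (fun d => !(pvHead d == some '?')))

-- ===== PORT B =====
-- one iteration of B's single loop: skip comments, merge '+' with a '-' stack top, else push
def pvAltStep (out : List String) (d : String) : List String :=
  if pvHead d = some '?' then out
  else if pvHead d = some '+' ∧ (out.getLast?.bind pvHead) = some '-' then
    out.dropLast ++ ["e" ++ PySem.Str.slice d (some 1) none]
  else
    out ++ [d]

def process_deltas_alt (delta : List String) : List String :=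
  delta.foldl pvAltStep []

-- ===== PRECONDITION & SPEC =====
-- Pre_ excludes lists containing an empty string, on which Python A raises IndexError at d[0].
def Pre_process_deltas (delta : List String) : Prop := ∀ d ∈ delta, d ≠ ""
instance (delta : List String) : Decidable (Pre_process_deltas delta) := by unfold Pre_process_deltas; infer_instance

def pvWitness_process_deltas : List String := ["- old", "+ new", "? hint", "  same"]

def Spec_process_deltas (delta : List String) (out : List String) : Prop := out = process_deltas_alt delta
instance (delta : List String) (out : List String) : Decidable (Spec_process_deltas delta out) := by unfold Spec_process_deltas; infer_instance

-- ===== CLAIM (what is proved, stated in full; the proofs are below) =====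
def Claim_equal_process_deltas : Prop := ∀ (delta : List String), Dom_process_deltas delta → Pre_process_deltas delta → Spec_process_deltas delta (process_deltas delta)

-- ===== LEMMAS AND PROOFS =====

-- "the stack top is not a deletion"
def pvLastOk (acc : List String) : Prop := acc.getLast?.bind pvHead ≠ some '-'

theorem pvLastOk_nil : pvLastOk [] := by simp [pvLastOk]

theorem pvLastOk_concat (acc : List String) (x : String) :
    pvLastOk (acc ++ [x]) ↔ pvHead x ≠ some '-' := by
  simp [pvLastOk]

theorem pvHead_edit (s : String) : pvHead ("e" ++ s) = some 'e' := by
  simp [pvHead, PySem.Str.pyGet?]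

-- B's fold ignores comment entries, so it equals the fold over A's filtered list
theorem pvFoldl_filter (l : List String) : ∀ acc : List String,
    List.foldl pvAltStep acc l =
      List.foldl pvAltStep acc (l.filter (fun d => !(pvHead d == some '?'))) := by
  induction l with
  | nil => intro acc; rfl
  | cons d l ih =>
    intro acc
    by_cases h : pvHead d = some '?'
    · simp [h, pvAltStep, ih acc]
    · simp [h, List.foldl_cons, ih, pvAltStep]

-- one non-comment step that does not merge just pushes d
theorem pvStep_push (acc : List String) (d : String)
    (hq : pvHead d ≠ some '?')
    (h : pvHead d ≠ some '+' ∨ pvLastOk acc) :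
    pvAltStep acc d = acc ++ [d] := by
  rcases h with h | h
  · simp [pvAltStep, hq, h]
  · simp only [pvLastOk, ne_eq] at h
    simp [pvAltStep, hq, h]

-- an insertion meeting a deletion on the stack top merges into an edit
theorem pvStep_merge (acc : List String) (x d : String)
    (hp : pvHead d = some '+')
    (hx : pvHead x = some '-') :
    pvAltStep (acc ++ [x]) d = acc ++ ["e" ++ PySem.Str.slice d (some 1) none] := by
  simp [pvAltStep, hp, hx]

-- Core invariant: on a comment-free list, if the head is not an insertion or the
-- stack top is not a deletion, B's fold appends exactly A's merge-loop output.
theorem pvFold_eq_merge (l : List String) : ∀ acc : List String,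
    (∀ d ∈ l, pvHead d ≠ some '?') →
    ((match l with | d :: _ => pvHead d ≠ some '+' | [] => True) ∨ pvLastOk acc) →
    List.foldl pvAltStep acc l = acc ++ pvMergeLoop l := by
  induction l using pvMergeLoop.induct with
  | case1 => intro acc _ _; simp [pvMergeLoop]
  | case2 d1 =>
    intro acc hnc hok
    have hq : pvHead d1 ≠ some '?' := hnc d1 (by simp)
    have hstep : pvAltStep acc d1 = acc ++ [d1] := pvStep_push acc d1 hq hok
    simp [List.foldl_cons, hstep, pvMergeLoop]
  | case3 d1 d2 rest hcond ih =>
    intro acc hnc hok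
    obtain ⟨h1, h2⟩ := hcond
    have h1' : pvHead d1 = some '-' := h1
    have h2' : pvHead d2 = some '+' := h2
    have hq1 : pvHead d1 ≠ some '?' := hnc d1 (by simp)
    have hq2 : pvHead d2 ≠ some '?' := hnc d2 (by simp)
    have hs1 : pvAltStep acc d1 = acc ++ [d1] :=
      pvStep_push acc d1 hq1 (Or.inl (by simp [h1']))
    have hs2 : pvAltStep (acc ++ [d1]) d2
        = acc ++ ["e" ++ PySem.Str.slice d2 (some 1) none] :=
      pvStep_merge acc d1 d2 h2' h1'
    have hrec := ih (acc ++ ["e" ++ PySem.Str.slice d2 (some 1) none])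
      (fun d hd => hnc d (by simp [hd]))
      (by
        right
        rw [pvLastOk_concat]
        simp [pvHead_edit])
    calc List.foldl pvAltStep acc (d1 :: d2 :: rest)
        = List.foldl pvAltStep (acc ++ ["e" ++ PySem.Str.slice d2 (some 1) none]) rest := by
          simp [List.foldl_cons, hs1, hs2]
      _ = acc ++ ("e" ++ PySem.Str.slice d2 (some 1) none) :: pvMergeLoop rest := by
          rw [hrec]; simp
      _ = acc ++ pvMergeLoop (d1 :: d2 :: rest) := by
          rw [pvMergeLoop]
          simp [h1', h2', parse_delta]
  | case4 d1 d2 rest hcond ih =>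
    intro acc hnc hok
    have hq1 : pvHead d1 ≠ some '?' := hnc d1 (by simp)
    have hok1 : pvHead d1 ≠ some '+' ∨ pvLastOk acc := by
      rcases hok with h | h
      · exact Or.inl h
      · exact Or.inr h
    have hs1 : pvAltStep acc d1 = acc ++ [d1] := pvStep_push acc d1 hq1 hok1
    have hok2 : pvHead d2 ≠ some '+' ∨ pvLastOk (acc ++ [d1]) := by
      by_cases hd1 : pvHead d1 = some '-'
      · left
        intro hd2
        exact hcond ⟨hd1, hd2⟩
      · right
        rw [pvLastOk_concat]
        exact hd1
    have hrec := ih (acc ++ [d1])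
      (fun d hd => hnc d (by simp at hd ⊢; tauto)) hok2
    calc List.foldl pvAltStep acc (d1 :: d2 :: rest)
        = List.foldl pvAltStep (acc ++ [d1]) (d2 :: rest) := by
          simp [List.foldl_cons, hs1]
      _ = acc ++ d1 :: pvMergeLoop (d2 :: rest) := by rw [hrec]; simp
      _ = acc ++ pvMergeLoop (d1 :: d2 :: rest) := by
          conv_rhs => rw [pvMergeLoop]
          rw [if_neg hcond]

theorem process_deltas_spec : Claim_equal_process_deltas := by
  intro delta _ _
  unfold Spec_process_deltas process_deltas process_deltas_alt
  rw [pvFoldl_filter]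
  rw [pvFold_eq_merge _ []]
  · simp
  · intro d hd
    have := List.of_mem_filter hd
    simpa using this
  · exact Or.inr pvLastOk_nil
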